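-- pv_equiv track=rewrite | github.com/adzai/adventofcode | 2020/aoc17.py | add_new
-- ===== SOURCE A (Python) =====
-- def is_neighbor(first, second):
--     for num1, num2 in zip(first, second):
--         if abs(num1 - num2) > 1:
--             return False
--     return True
--
-- def add_new(coordinates, bounds):
--     to_add = []
--     lowest_z, highest_z = bounds[2][0] - 1, bounds[2][1] + 1
--     lowest_y, highest_y = -1, bounds[1][1] + 1
--     lowest_x, highest_x = -1, bounds[0][1] + 1
--     for z in range(lowest_z, highest_z + 1):
--         for y in range(lowest_y, highest_y + 1):
--             for x in range(lowest_x, highest_x + 1):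
--                 current_neighbors = 0
--                 for active in coordinates:
--                     if is_neighbor(active, (x, y, z)):
--                         current_neighbors += 1
--                 if current_neighbors == 3:
--                     to_add.append((x, y, z))
--     return to_add
-- ===== SOURCE B (Python) =====
-- NEIGHBOR_OFFSETS = [(dx, dy, dz) for dz in (-1, 0, 1) for dy in (-1, 0, 1) for dx in (-1, 0, 1)]
--
-- def add_new(coordinates, bounds):
--     # Scatter: each active cell contributes +1 to all 27 cells of its 3x3x3 block
--     # (including itself), so counts[cell] == number of actives within Chebyshev
--     # distance <= 1 of cell. Then gather over the box with one lookup per cell.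
--     counts = {}
--     for cx, cy, cz in coordinates:
--         for dx, dy, dz in NEIGHBOR_OFFSETS:
--             key = (cx + dx, cy + dy, cz + dz)
--             counts[key] = counts.get(key, 0) + 1
--     to_add = []
--     for z in range(bounds[2][0] - 1, bounds[2][1] + 2):
--         for y in range(-1, bounds[1][1] + 2):
--             for x in range(-1, bounds[0][1] + 2):
--                 if counts.get((x, y, z), 0) == 3:
--                     to_add.append((x, y, z))
--     return to_add
-- ===== Notes on version B (the rewrite author's own statement) =====
-- stated objective: alternative
-- what changed: Instead of scanning every active coordinate for each cell of the box (gather), B makes one scatter pass incrementing a neighbor-count dict over the 27 offsets of each active cell, so the per-cell test becomes a single dict lookup.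
import Mathlib
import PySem

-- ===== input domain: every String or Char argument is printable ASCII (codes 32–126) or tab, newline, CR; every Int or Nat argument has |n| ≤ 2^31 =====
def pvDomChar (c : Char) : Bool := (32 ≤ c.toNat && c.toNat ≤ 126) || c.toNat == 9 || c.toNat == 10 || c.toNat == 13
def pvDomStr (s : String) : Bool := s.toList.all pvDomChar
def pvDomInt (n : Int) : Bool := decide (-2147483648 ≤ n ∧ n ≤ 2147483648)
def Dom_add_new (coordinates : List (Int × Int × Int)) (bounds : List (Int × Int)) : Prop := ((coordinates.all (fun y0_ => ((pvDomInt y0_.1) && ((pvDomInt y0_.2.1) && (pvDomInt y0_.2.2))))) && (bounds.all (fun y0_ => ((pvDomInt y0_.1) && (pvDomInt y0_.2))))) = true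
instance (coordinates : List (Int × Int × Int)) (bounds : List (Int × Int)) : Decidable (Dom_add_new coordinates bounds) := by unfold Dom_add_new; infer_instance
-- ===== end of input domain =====

-- B replaces A's per-cell scan of all active coordinates by one scatter pass that
-- increments a neighbor-count dict over the 27 offsets of each active cell; the
-- per-cell test becomes a single dict lookup (objective: alternative).

-- ===== PORT A =====
-- the zip over two 3-tuples unrolled: the loop checks the components in order
def is_neighbor (first second : Int × Int × Int) : Bool :=
  if |first.1 - second.1| > 1 then false
  else if |first.2.1 - second.2.1| > 1 then false
  else if |first.2.2 - second.2.2| > 1 then false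
  else true

def add_new (coordinates : List (Int × Int × Int)) (bounds : List (Int × Int)) : List (Int × Int × Int) :=
  let lowest_z := (PySem.List.pyGetD bounds 2 (0, 0)).1 - 1
  let highest_z := (PySem.List.pyGetD bounds 2 (0, 0)).2 + 1
  let highest_y := (PySem.List.pyGetD bounds 1 (0, 0)).2 + 1
  let highest_x := (PySem.List.pyGetD bounds 0 (0, 0)).2 + 1
  (PySem.List.pyRange lowest_z (highest_z + 1) 1).foldl (fun acc z =>
    (PySem.List.pyRange (-1) (highest_y + 1) 1).foldl (fun acc y =>
      (PySem.List.pyRange (-1) (highest_x + 1) 1).foldl (fun acc x =>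
        let current_neighbors : Int :=
          coordinates.foldl (fun cnt active =>
            if is_neighbor active (x, y, z) then cnt + 1 else cnt) 0
        if current_neighbors == 3 then acc ++ [(x, y, z)] else acc) acc) acc) []

-- ===== PORT B =====
-- the module-level comprehension [(dx,dy,dz) for dz in (-1,0,1) for dy in (-1,0,1) for dx in (-1,0,1)]
def NEIGHBOR_OFFSETS : List (Int × Int × Int) :=
  ([-1, 0, 1] : List Int).flatMap (fun dz =>
    ([-1, 0, 1] : List Int).flatMap (fun dy =>
      ([-1, 0, 1] : List Int).map (fun dx => (dx, dy, dz))))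

def add_new_alt (coordinates : List (Int × Int × Int)) (bounds : List (Int × Int)) : List (Int × Int × Int) :=
  let counts : PySem.Dict (Int × Int × Int) Int :=
    coordinates.foldl (fun d c =>
      NEIGHBOR_OFFSETS.foldl (fun d o =>
        d.modify (c.1 + o.1, c.2.1 + o.2.1, c.2.2 + o.2.2) 0 (· + 1)) d) PySem.Dict.empty
  (PySem.List.pyRange ((PySem.List.pyGetD bounds 2 (0, 0)).1 - 1) ((PySem.List.pyGetD bounds 2 (0, 0)).2 + 2) 1).foldl (fun acc z =>
    (PySem.List.pyRange (-1) ((PySem.List.pyGetD bounds 1 (0, 0)).2 + 2) 1).foldl (fun acc y =>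
      (PySem.List.pyRange (-1) ((PySem.List.pyGetD bounds 0 (0, 0)).2 + 2) 1).foldl (fun acc x =>
        if counts.getD (x, y, z) 0 == 3 then acc ++ [(x, y, z)] else acc) acc) acc) []

-- ===== PRECONDITION & SPEC =====
-- Pre_ excludes only the inputs on which the Python A raises IndexError: bounds with fewer than 3 entries.
def Pre_add_new (coordinates : List (Int × Int × Int)) (bounds : List (Int × Int)) : Prop :=
  3 ≤ bounds.length
instance (coordinates : List (Int × Int × Int)) (bounds : List (Int × Int)) : Decidable (Pre_add_new coordinates bounds) := by unfold Pre_add_new; infer_instance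
def pvWitness_add_new : (List (Int × Int × Int)) × (List (Int × Int)) :=
  ([(0, 0, 0), (1, 0, 0), (0, 1, 0)], [(0, 1), (0, 1), (0, 1)])

def Spec_add_new (coordinates : List (Int × Int × Int)) (bounds : List (Int × Int)) (out : List (Int × Int × Int)) : Prop := out = add_new_alt coordinates bounds
instance (coordinates : List (Int × Int × Int)) (bounds : List (Int × Int)) (out : List (Int × Int × Int)) : Decidable (Spec_add_new coordinates bounds out) := by unfold Spec_add_new; infer_instance

-- ===== CLAIM (what is proved, stated in full; the proofs are below) =====
def Claim_equal_add_new : Prop := ∀ (coordinates : List (Int × Int × Int)) (bounds : List (Int × Int)), Dom_add_new coordinates bounds → Pre_add_new coordinates bounds → Spec_add_new coordinates bounds (add_new coordinates bounds)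

-- ===== LEMMAS AND PROOFS =====

theorem is_neighbor_iff (c v : Int × Int × Int) :
    is_neighbor c v = true ↔ (|c.1 - v.1| ≤ 1 ∧ |c.2.1 - v.2.1| ≤ 1 ∧ |c.2.2 - v.2.2| ≤ 1) := by
  unfold is_neighbor
  split_ifs <;> simp_all <;> omega

-- the 27 cells one active cell c contributes to
def scatterKeys (c : Int × Int × Int) : List (Int × Int × Int) :=
  NEIGHBOR_OFFSETS.map (fun o => (c.1 + o.1, c.2.1 + o.2.1, c.2.2 + o.2.2))

theorem mem_scatterKeys (c v : Int × Int × Int) :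
    v ∈ scatterKeys c ↔ is_neighbor c v = true := by
  rw [is_neighbor_iff]
  unfold scatterKeys NEIGHBOR_OFFSETS
  simp only [List.mem_map, List.mem_flatMap]
  constructor
  · rintro ⟨o, ⟨dz, hdz, dy, hdy, dx, hdx, rfl⟩, rfl⟩
    simp only [List.mem_cons, List.not_mem_nil, or_false] at hdz hdy hdx
    rcases hdx with rfl | rfl | rfl <;> rcases hdy with rfl | rfl | rfl <;>
      rcases hdz with rfl | rfl | rfl <;> simp [abs_le] <;> omega
  · rintro ⟨h1, h2, h3⟩
    rw [abs_le] at h1 h2 h3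
    refine ⟨(v.1 - c.1, v.2.1 - c.2.1, v.2.2 - c.2.2),
      ⟨v.2.2 - c.2.2, ?_, v.2.1 - c.2.1, ?_, v.1 - c.1, ?_, rfl⟩, ?_⟩
    · simp only [List.mem_cons, List.not_mem_nil, or_false]; omega
    · simp only [List.mem_cons, List.not_mem_nil, or_false]; omega
    · simp only [List.mem_cons, List.not_mem_nil, or_false]; omega
    · simp

theorem nodup_scatterKeys (c : Int × Int × Int) : (scatterKeys c).Nodup := by
  refine List.Nodup.map ?_ (by unfold NEIGHBOR_OFFSETS; decide)
  intro a b hab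
  simp only [Prod.mk.injEq] at hab
  obtain ⟨h1, h2, h3⟩ := hab
  exact Prod.ext (by omega) (Prod.ext (by omega) (by omega))

theorem count_scatterKeys (c v : Int × Int × Int) :
    (scatterKeys c).count v = (if is_neighbor c v then 1 else 0) := by
  by_cases h : is_neighbor c v = true
  · rw [if_pos h]
    exact List.count_eq_one_of_mem (nodup_scatterKeys c) ((mem_scatterKeys c v).mpr h)
  · rw [if_neg h, List.count_eq_zero]
    exact fun hv => h ((mem_scatterKeys c v).mp hv)

-- the scatter dict's value at v counts the active cells neighboring v
theorem getD_scatter (l : List (Int × Int × Int)) (d : PySem.Dict (Int × Int × Int) Int)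
    (v : Int × Int × Int) :
    (l.foldl (fun d c =>
        NEIGHBOR_OFFSETS.foldl (fun d o =>
          d.modify (c.1 + o.1, c.2.1 + o.2.1, c.2.2 + o.2.2) 0 (· + 1)) d) d).getD v 0
      = d.getD v 0 + (l.countP (fun c => is_neighbor c v) : Int) := by
  induction l generalizing d with
  | nil => simp
  | cons c l ih =>
    simp only [List.foldl_cons, List.countP_cons]
    have step : NEIGHBOR_OFFSETS.foldl (fun d o =>
          d.modify (c.1 + o.1, c.2.1 + o.2.1, c.2.2 + o.2.2) 0 (· + 1)) d
        = (scatterKeys c).foldl (fun d k => d.modify k 0 (· + 1)) d := by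
      unfold scatterKeys
      rw [List.foldl_map]
    rw [ih, step, PySem.Dict.getD_foldl_modify_add_one, count_scatterKeys]
    by_cases h : is_neighbor c v = true <;> simp [h] <;> ring

-- ===== VERDICT (by name: the statement is the Claim_ definition above) =====
theorem add_new_spec : Claim_equal_add_new := by
  intro coordinates bounds _ _
  unfold Spec_add_new add_new add_new_alt
  have h2 : ∀ a : Int, a + 1 + 1 = a + 2 := fun a => by ring
  simp only [getD_scatter, PySem.Dict.getD_empty, PySem.List.foldl_if_add_one, zero_add, h2]
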